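-- pv_equiv track=rewrite | github.com/samhaswon/bible_search | src/multi_bible_search/bible_search.py | _ranked
-- ===== SOURCE A (Python) =====
-- from typing import List, Union
--
-- def _ranked(refs: List[tuple], num_tokens: int) -> List[tuple]:
--     """
--     Ranks search results by the count of tokens.
--     :param refs: List of tuple references to rank.
--     :param num_tokens: The number of tokens in the query. Hoists results with this number of tokens to the top of
--     results.
--     :return: Ranked search results.
--     """
--     most_likely = []
--     others = []
--     for ref in refs:
--         if ref[1] == num_tokens:
--             most_likely.append(ref)
--         else:
--             others.append(ref)
--     most_likely.extend(others)
--     return most_likely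
-- ===== SOURCE B (Python) =====
-- from typing import List
--
-- def _ranked(refs: List[tuple], num_tokens: int) -> List[tuple]:
--     """Rank by hoisting refs whose token count matches num_tokens to the front,
--     via a single stable sort on a boolean key (False sorts first; stability
--     preserves the original order within each group)."""
--     return sorted(refs, key=lambda ref: ref[1] != num_tokens)
-- ===== Notes on version B (the rewrite author's own statement) =====
-- stated objective: idiomatic
-- what changed: Replaces the manual two-list partition loop with a single stable sort on the boolean key ref[1] != num_tokens, relying on sort stability to preserve original order within each group.
import Mathlib
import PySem

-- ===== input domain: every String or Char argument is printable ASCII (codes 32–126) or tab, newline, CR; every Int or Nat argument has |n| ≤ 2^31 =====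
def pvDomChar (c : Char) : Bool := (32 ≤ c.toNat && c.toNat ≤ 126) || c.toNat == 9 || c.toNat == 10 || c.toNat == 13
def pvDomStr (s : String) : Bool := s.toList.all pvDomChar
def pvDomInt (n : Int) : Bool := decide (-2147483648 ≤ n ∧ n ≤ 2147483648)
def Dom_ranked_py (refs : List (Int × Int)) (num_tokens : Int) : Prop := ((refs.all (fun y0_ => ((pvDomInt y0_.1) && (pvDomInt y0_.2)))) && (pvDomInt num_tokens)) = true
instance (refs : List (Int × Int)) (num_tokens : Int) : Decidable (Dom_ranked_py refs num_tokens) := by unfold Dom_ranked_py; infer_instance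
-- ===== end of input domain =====

-- B replaces A's two-list partition loop with one stable sort on the boolean key ref[1] != num_tokens (idiomatic; return value only, A mutates neither argument).

-- ===== PORT A =====
-- for-loop appending each ref to most_likely or others, then most_likely.extend(others)
def ranked_py (refs : List (Int × Int)) (num_tokens : Int) : List (Int × Int) :=
  let p := refs.foldl
    (fun (acc : List (Int × Int) × List (Int × Int)) ref =>
      if ref.2 == num_tokens then (acc.1 ++ [ref], acc.2) else (acc.1, acc.2 ++ [ref]))
    ([], [])
  p.1 ++ p.2

-- ===== PORT B =====
-- sorted(refs, key=lambda ref: ref[1] != num_tokens); the bool key False/True is 0/1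
def ranked_py_alt (refs : List (Int × Int)) (num_tokens : Int) : List (Int × Int) :=
  PySem.List.sorted refs (fun ref => if ref.2 ≠ num_tokens then (1 : Int) else 0) false

-- ===== PRECONDITION & SPEC =====
def Spec_ranked_py (refs : List (Int × Int)) (num_tokens : Int) (out : List (Int × Int)) : Prop := out = ranked_py_alt refs num_tokens
instance (refs : List (Int × Int)) (num_tokens : Int) (out : List (Int × Int)) : Decidable (Spec_ranked_py refs num_tokens out) := by unfold Spec_ranked_py; infer_instance

-- ===== CLAIM (what is proved, stated in full; the proofs are below) =====
def Claim_equal_ranked_py : Prop := ∀ (refs : List (Int × Int)) (num_tokens : Int), Dom_ranked_py refs num_tokens → Spec_ranked_py refs num_tokens (ranked_py refs num_tokens)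

-- ===== LEMMAS AND PROOFS =====

-- A's loop: foldl with accumulators (ml, ot) appends the matching refs to ml and the rest to ot
theorem ranked_foldl_eq (num_tokens : Int) :
    ∀ (xs : List (Int × Int)) (ml ot : List (Int × Int)),
    xs.foldl
      (fun (acc : List (Int × Int) × List (Int × Int)) ref =>
        if ref.2 == num_tokens then (acc.1 ++ [ref], acc.2) else (acc.1, acc.2 ++ [ref]))
      (ml, ot)
    = (ml ++ xs.filter (fun r => r.2 == num_tokens), ot ++ xs.filter (fun r => !(r.2 == num_tokens))) := by
  intro xs
  induction xs with
  | nil => intro ml ot; simp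
  | cons x xs ih =>
    intro ml ot
    rw [List.foldl_cons]
    by_cases hx : x.2 = num_tokens
    · rw [if_pos (by simp [hx]), ih, List.filter_cons, List.filter_cons]
      simp [hx]
    · rw [if_neg (by simp [hx]), ih, List.filter_cons, List.filter_cons]
      simp [hx]

-- inserting a matching ref into (a ++ b), a all matching, b all non-matching, puts it between them
theorem insert_match (num_tokens : Int) (x : Int × Int) (hx : x.2 = num_tokens) :
    ∀ (a b : List (Int × Int)), (∀ y ∈ a, y.2 = num_tokens) → (∀ y ∈ b, y.2 ≠ num_tokens) →
    PySem.List.insertBy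
      (fun p q => decide ((if p.2 ≠ num_tokens then (1 : Int) else 0) < (if q.2 ≠ num_tokens then (1 : Int) else 0))) x (a ++ b)
    = a ++ x :: b := by
  intro a
  induction a with
  | nil =>
    intro b _ hb
    cases b with
    | nil => simp [PySem.List.insertBy]
    | cons y ys =>
      have hy : y.2 ≠ num_tokens := hb y (by simp)
      simp [PySem.List.insertBy, hx, hy]
  | cons z a ih =>
    intro b ha hb
    have hz : z.2 = num_tokens := ha z (by simp)
    simp only [List.cons_append, PySem.List.insertBy]
    rw [if_neg (by simp [hx, hz]), ih b (fun y hy => ha y (by simp [hy])) hb]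

-- the sort's foldl over insertBy keeps the accumulator partitioned: matching prefix, non-matching suffix
theorem sort_foldl_eq (num_tokens : Int) :
    ∀ (xs a b : List (Int × Int)), (∀ y ∈ a, y.2 = num_tokens) → (∀ y ∈ b, y.2 ≠ num_tokens) →
    xs.foldl
      (fun acc x => PySem.List.insertBy
        (fun p q => decide ((if p.2 ≠ num_tokens then (1 : Int) else 0) < (if q.2 ≠ num_tokens then (1 : Int) else 0))) x acc)
      (a ++ b)
    = (a ++ xs.filter (fun r => r.2 == num_tokens)) ++ (b ++ xs.filter (fun r => !(r.2 == num_tokens))) := by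
  intro xs
  induction xs with
  | nil => intro a b _ _; simp
  | cons x xs ih =>
    intro a b ha hb
    by_cases hx : x.2 = num_tokens
    · have hstep := insert_match num_tokens x hx a b ha hb
      have : a ++ x :: b = (a ++ [x]) ++ b := by simp
      rw [List.foldl_cons, hstep, this,
        ih (a ++ [x]) b (by intro y hy; rcases List.mem_append.mp hy with h | h;
                            exact ha y h; simp at h; simpa [h]) hb]
      simp [hx]
    · have hstep : PySem.List.insertBy
          (fun p q => decide ((if p.2 ≠ num_tokens then (1 : Int) else 0) < (if q.2 ≠ num_tokens then (1 : Int) else 0))) x (a ++ b)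
          = (a ++ b) ++ [x] := by
        apply PySem.List.insertBy_of_forall_not_before
        intro y _
        split <;> split <;> simp_all
      have : (a ++ b) ++ [x] = a ++ (b ++ [x]) := by simp
      rw [List.foldl_cons, hstep, this,
        ih a (b ++ [x]) ha (by intro y hy; rcases List.mem_append.mp hy with h | h;
                               exact hb y h; simp at h; simpa [h])]
      simp [hx]

-- ===== VERDICT (by name: the statement is the Claim_ definition above) =====
theorem ranked_py_spec : Claim_equal_ranked_py := by
  intro refs num_tokens _
  unfold Spec_ranked_py ranked_py ranked_py_alt
  rw [PySem.List.sorted_eq_foldl_insertBy]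
  have hA := ranked_foldl_eq num_tokens refs [] []
  have hB := sort_foldl_eq num_tokens refs [] [] (by simp) (by simp)
  simp only [List.nil_append, List.append_nil] at hA hB
  simp only [hA, hB]
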